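-- pv_equiv track=rewrite | github.com/metomi/rose | sphinx/ext/minicylc.py | extract_or_deps
-- ===== SOURCE A (Python) =====
-- def extract_or_deps(dep):
--     """Return a list of tasks which have an OR dependency in a string."""
--     ors = set([])
--     ind = 0
--     while ind < len(dep):
--         if dep[ind] == '|':
--             # Scan backwards.
--             lvl = 0
--             tmp_ind = ind
--             while lvl >= 0 and tmp_ind > 0:
--                 if dep[tmp_ind] == '(':
--                     lvl -= 1
--                 elif dep[tmp_ind] == ')':
--                     lvl += 1
--                 else:
--                     if dep[tmp_ind] not in ['&', '|']:
--                         ors.add(dep[tmp_ind])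
--                 tmp_ind -= 1
--             # Scan forwards.
--             lvl = 0
--             tmp_ind = ind
--             while lvl >= 0 and tmp_ind < len(dep):
--                 if dep[tmp_ind] == '(':
--                     lvl += 1
--                 elif dep[tmp_ind] == ')':
--                     lvl -= 1
--                 else:
--                     if dep[tmp_ind] not in ['&', '|']:
--                         ors.add(dep[tmp_ind])
--                 tmp_ind += 1
--         ind += 1
--     return ors
-- ===== SOURCE B (Python) =====
-- def extract_or_deps(dep):
--     """Return a list of tasks which have an OR dependency in a string."""
--     n = len(dep)
--     # prefix parenthesis balance: bal[k] = #'(' - #')' in dep[:k]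
--     bal = [0] * (n + 1)
--     for j in range(n):
--         bal[j + 1] = bal[j] + (dep[j] == '(') - (dep[j] == ')')
--     # for each '|' at i, its scan span is bounded by the closest positions
--     # (left and right) where the balance drops below bal[i]
--     last_below = {}   # balance level -> last index k seen with bal[k] == level
--     starts = {}       # '|' position -> leftmost scanned index
--     for k in range(n + 1):
--         last_below[bal[k]] = k
--         if k < n and dep[k] == '|':
--             starts[k] = last_below.get(bal[k] - 1, 0)
--     next_below = {}   # balance level -> next index k with bal[k] == level
--     stops = {}        # '|' position -> one past the rightmost scanned index
--     for k in range(n, -1, -1):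
--         if k < n and dep[k] == '|':
--             stops[k] = min(next_below.get(bal[k] - 1, n + 1), n)
--         next_below[bal[k]] = k
--     ors = set()
--     done = set()      # spans already collected (several '|' can share one)
--     for i in starts:
--         span = (starts[i], stops[i])
--         if span in done:
--             continue
--         done.add(span)
--         for j in range(i, span[0] - 1, -1):
--             if dep[j] not in '()&|':
--                 ors.add(dep[j])
--         for j in range(i + 1, span[1]):
--             if dep[j] not in '()&|':
--                 ors.add(dep[j])
--     return ors
-- ===== Notes on version B (the rewrite author's own statement) =====
-- stated objective: alternative
-- what changed: A rescans the string with level counters around every '|' (quadratic when many '|' share a group); B precomputes one prefix-balance table and last/next below-level dictionaries that give each '|' its scan span directly, and a seen-span set emits every span once.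
-- intended difference: On strings whose first character is an ordinary task character that lies in the scan range of a top-level '|' (the backward scan meets no enclosing '(') and was not already collected, A's backward scan stops at index 1 and silently drops that character; B scans down to index 0 and includes it, as the docstring intends. — e.g. on extract_or_deps("a|b"): A returns ["b"], B returns ["a", "b"]
import Mathlib
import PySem

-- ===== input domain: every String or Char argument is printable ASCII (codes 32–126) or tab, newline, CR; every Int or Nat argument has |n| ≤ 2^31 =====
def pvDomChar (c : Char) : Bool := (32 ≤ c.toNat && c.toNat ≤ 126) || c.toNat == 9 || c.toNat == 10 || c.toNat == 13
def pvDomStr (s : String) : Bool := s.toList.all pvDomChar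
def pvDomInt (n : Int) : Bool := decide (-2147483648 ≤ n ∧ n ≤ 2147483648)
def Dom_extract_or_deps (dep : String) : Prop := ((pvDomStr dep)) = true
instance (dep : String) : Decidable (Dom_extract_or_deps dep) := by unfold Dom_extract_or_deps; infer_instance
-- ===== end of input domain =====

-- B recomputes each '|''s scan span from one prefix-balance table instead of rescanning with
-- level counters; it also includes the string's first character where A's backward scan
-- (an off-by-one: `tmp_ind > 0`) silently drops it — that intended difference is D_ below.

-- ===== PORT A =====
-- backward scan of A: `while lvl >= 0 and tmp_ind > 0: …; tmp_ind -= 1`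
def pvScanB (cs : List Char) (lvl : Int) : Nat → PySem.Set Char → PySem.Set Char
  | 0, s => s
  | t + 1, s =>
    if 0 ≤ lvl then
      let c := cs.getD (t + 1) ' '
      if c = '(' then pvScanB cs (lvl - 1) t s
      else if c = ')' then pvScanB cs (lvl + 1) t s
      else if c = '&' ∨ c = '|' then pvScanB cs lvl t s
      else pvScanB cs lvl t (PySem.Set.add s c)
    else s

-- forward scan of A: `while lvl >= 0 and tmp_ind < len(dep): …; tmp_ind += 1`
def pvScanFGo (cs : List Char) : Nat → Int → Nat → PySem.Set Char → PySem.Set Char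
  | 0, _, _, s => s
  | f + 1, lvl, tmp, s =>
    if 0 ≤ lvl ∧ tmp < cs.length then
      let c := cs.getD tmp ' '
      if c = '(' then pvScanFGo cs f (lvl + 1) (tmp + 1) s
      else if c = ')' then pvScanFGo cs f (lvl - 1) (tmp + 1) s
      else if c = '&' ∨ c = '|' then pvScanFGo cs f lvl (tmp + 1) s
      else pvScanFGo cs f lvl (tmp + 1) (PySem.Set.add s c)
    else s

def pvScanF (cs : List Char) (lvl : Int) (tmp : Nat) (s : PySem.Set Char) : PySem.Set Char :=
  pvScanFGo cs (cs.length - tmp) lvl tmp s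

def extract_or_deps (dep : String) : List String :=
  let cs := dep.toList
  ((List.range cs.length).foldl
    (fun s ind => if cs.getD ind ' ' = '|' then pvScanF cs 0 ind (pvScanB cs 0 ind s) else s)
    PySem.Set.empty).map (fun c => String.ofList [c])

-- ===== PORT B =====
-- `dep[j] not in '()&|'`
def pvKeep (c : Char) : Bool := !(c = '(' || c = ')' || c = '&' || c = '|')

-- bal[j+1] = bal[j] + (dep[j]=='(') - (dep[j]==')')
def pvBalArr (cs : List Char) : List Int :=
  (List.range cs.length).foldl
    (fun b j => b ++ [b.getD j 0 +
      ((if cs.getD j ' ' = '(' then (1 : Int) else 0) - (if cs.getD j ' ' = ')' then 1 else 0))])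
    [0]

-- forward pass body: `last_below[bal[k]] = k; if k < n and dep[k] == '|': starts[k] = last_below.get(bal[k]-1, 0)`
def pvStep1 (cs : List Char) (bal : List Int) (st : PySem.Dict Int Int × PySem.Dict Int Int)
    (k : Nat) : PySem.Dict Int Int × PySem.Dict Int Int :=
  let lb := st.1.insert (bal.getD k 0) (k : Int)
  (lb, if k < cs.length ∧ cs.getD k ' ' = '|'
    then st.2.insert (k : Int) (lb.getD (bal.getD k 0 - 1) 0) else st.2)

-- backward pass body: `if k < n and dep[k] == '|': stops[k] = min(next_below.get(bal[k]-1, n+1), n); next_below[bal[k]] = k`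
def pvStep2 (cs : List Char) (bal : List Int) (st : PySem.Dict Int Int × PySem.Dict Int Int)
    (k : Int) : PySem.Dict Int Int × PySem.Dict Int Int :=
  (st.1.insert (PySem.List.pyGetD bal k 0) k,
   if k < (cs.length : Int) ∧ PySem.List.pyGetD cs k ' ' = '|'
    then st.2.insert k
      (min (st.1.getD (PySem.List.pyGetD bal k 0 - 1) ((cs.length : Int) + 1)) (cs.length : Int))
    else st.2)

-- emission body: skip an already-collected span, else add the span's chars (backward from i, then forward)
def pvStep3 (cs : List Char) (starts stops : PySem.Dict Int Int)
    (st : PySem.Set Char × PySem.Set (Int × Int)) (i : Int) :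
    PySem.Set Char × PySem.Set (Int × Int) :=
  let span := (starts.getD i 0, stops.getD i 0)
  if PySem.Set.contains st.2 span then st
  else
    let ors := (PySem.List.pyRange i (span.1 - 1) (-1)).foldl
      (fun o j => if pvKeep (PySem.List.pyGetD cs j ' ')
        then PySem.Set.add o (PySem.List.pyGetD cs j ' ') else o) st.1
    let ors := (PySem.List.pyRange (i + 1) span.2 1).foldl
      (fun o j => if pvKeep (PySem.List.pyGetD cs j ' ')
        then PySem.Set.add o (PySem.List.pyGetD cs j ' ') else o) ors
    (ors, PySem.Set.add st.2 span)

def extract_or_deps_alt (dep : String) : List String :=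
  let cs := dep.toList
  let bal := pvBalArr cs
  let starts := ((List.range (cs.length + 1)).foldl (pvStep1 cs bal)
    (PySem.Dict.empty, PySem.Dict.empty)).2
  let stops := ((PySem.List.pyRange (cs.length : Int) (-1) (-1)).foldl (pvStep2 cs bal)
    (PySem.Dict.empty, PySem.Dict.empty)).2
  let res := starts.keys.foldl (pvStep3 cs starts stops) (PySem.Set.empty, PySem.Set.empty)
  res.1.map (fun c => String.ofList [c])

-- ===== PRECONDITION & SPEC =====
-- closed-form parenthesis nesting of the prefix dep[:k] (used only by D_ below)
def pvBal (cs : List Char) (k : Nat) : Int :=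
  ((cs.take k).count '(' - (cs.take k).count ')' : Int)

-- position j lies in the scan range of the '|' at i: the nesting never drops below i's between them
def pvCov (cs : List Char) (i j : Nat) : Bool :=
  (List.range (max i j + 1)).all fun k => decide (min i j < k → pvBal cs i ≤ pvBal cs k)

-- a '|' whose backward scan meets no enclosing '(' and so runs to the front of the string
def pvTopBar (cs : List Char) (i : Nat) : Bool :=
  cs.getD i ' ' == '|' && pvCov cs i 0

-- On strings whose first character is an ordinary task character that lies in the scan range of a
-- top-level '|' (the backward scan meets no enclosing '(') and was not already collected, A's
-- backward scan stops at index 1 and silently drops that character; B scans down to index 0 and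
-- includes it, as the docstring intends.
def D_extract_or_deps (dep : String) : Prop :=
  let cs := dep.toList
  cs.getD 0 ' ' ∉ ['(', ')', '&', '|'] ∧ '|' ∈ cs ∧
  ∃ i0 ∈ List.range cs.length, pvTopBar cs i0 ∧
    ∀ j ∈ List.range cs.length, 0 < j → cs.getD j ' ' = cs.getD 0 ' ' →
      ¬ (j ≤ i0 ∨ ∃ i ∈ List.range i0, cs.getD i ' ' = '|' ∧ pvCov cs i j)
instance (dep : String) : Decidable (D_extract_or_deps dep) := by unfold D_extract_or_deps; infer_instance

def Spec_extract_or_deps (dep : String) (out : List String) : Prop :=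
  ¬ D_extract_or_deps dep → out = extract_or_deps_alt dep
instance (dep : String) (out : List String) : Decidable (Spec_extract_or_deps dep out) := by unfold Spec_extract_or_deps; infer_instance

def pvDiffWitness_extract_or_deps : String := "a|b"
def pvDiffWitnessOut_extract_or_deps : (List String) × (List String) := (["b"], ["a", "b"])

-- ===== CLAIM (what is proved, stated in full; the proofs are below) =====
def Claim_unchanged_extract_or_deps : Prop := ∀ (dep : String), Dom_extract_or_deps dep → Spec_extract_or_deps dep (extract_or_deps dep)
def Claim_changed_extract_or_deps : Prop := Dom_extract_or_deps (pvDiffWitness_extract_or_deps) ∧ D_extract_or_deps (pvDiffWitness_extract_or_deps) ∧ extract_or_deps (pvDiffWitness_extract_or_deps) = pvDiffWitnessOut_extract_or_deps.1 ∧ extract_or_deps_alt (pvDiffWitness_extract_or_deps) = pvDiffWitnessOut_extract_or_deps.2 ∧ pvDiffWitnessOut_extract_or_deps.1 ≠ pvDiffWitnessOut_extract_or_deps.2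

-- ===== LEMMAS AND PROOFS =====

-- ---------- balance basics ----------
def pvDelta (c : Char) : Int := (if c = '(' then 1 else 0) - (if c = ')' then 1 else 0)

theorem pvBal_succ (cs : List Char) (k : Nat) (h : k < cs.length) :
    pvBal cs (k + 1) = pvBal cs k + pvDelta (cs.getD k ' ') := by
  unfold pvBal pvDelta
  have ht : cs.take (k + 1) = cs.take k ++ [cs[k]] := by
    rw [List.take_add_one]; simp [List.getElem?_eq_getElem h]
  rw [ht, List.count_append, List.count_append]
  simp only [List.getD, List.getElem?_eq_getElem h, Option.getD_some, List.count_singleton]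
  by_cases h1 : cs[k] = '(' <;> by_cases h2 : cs[k] = ')' <;>
    simp [h1, h2] <;> push_cast <;> first | omega | (exfalso; rw [h1] at h2; exact absurd h2 (by decide))

theorem pvBal_stop (cs : List Char) (k : Nat) (h : cs.length ≤ k) :
    pvBal cs k = pvBal cs cs.length := by
  unfold pvBal
  rw [List.take_of_length_le h, List.take_of_length_le (le_refl _)]

theorem pvBal_succ_ge (cs : List Char) (k : Nat) (h : cs.length ≤ k) :
    pvBal cs (k + 1) = pvBal cs k := by
  rw [pvBal_stop cs k h, pvBal_stop cs (k+1) (by omega)]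

theorem pvDelta_le_one (c : Char) : pvDelta c ≤ 1 := by
  unfold pvDelta; split_ifs <;> omega

theorem pvDelta_ge_neg_one (c : Char) : -1 ≤ pvDelta c := by
  unfold pvDelta; split_ifs <;> omega

theorem pvBal_step_le (cs : List Char) (k : Nat) : pvBal cs (k + 1) ≤ pvBal cs k + 1 := by
  by_cases h : k < cs.length
  · rw [pvBal_succ cs k h]; have := pvDelta_le_one (cs.getD k ' '); omega
  · rw [pvBal_succ_ge cs k (by omega)]; omega

theorem pvBal_step_ge (cs : List Char) (k : Nat) : pvBal cs k - 1 ≤ pvBal cs (k + 1) := by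
  by_cases h : k < cs.length
  · rw [pvBal_succ cs k h]; have := pvDelta_ge_neg_one (cs.getD k ' '); omega
  · rw [pvBal_succ_ge cs k (by omega)]; omega

theorem pvDelta_eq_one (c : Char) (h : pvDelta c = 1) : c = '(' := by
  unfold pvDelta at h; split_ifs at h with h1 h2 <;> first | exact h1 | omega

theorem pvKeep_iff (c : Char) : pvKeep c = true ↔ c ∉ ['(', ')', '&', '|'] := by
  unfold pvKeep
  by_cases h1 : c = '(' <;> by_cases h2 : c = ')' <;> by_cases h3 : c = '&' <;>
    by_cases h4 : c = '|' <;> simp [h1, h2, h3, h4]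

theorem pvKeep_eq_true {c : Char} (h1 : c ≠ '(') (h2 : c ≠ ')') (h3 : c ≠ '&') (h4 : c ≠ '|') :
    pvKeep c = true := by
  simp [pvKeep, h1, h2, h3, h4]

-- ---------- scan twins: the scans are Set.update with an emission list ----------
def pvScanBL (cs : List Char) (lvl : Int) : Nat → List Char
  | 0 => []
  | t + 1 =>
    if 0 ≤ lvl then
      let c := cs.getD (t + 1) ' '
      if c = '(' then pvScanBL cs (lvl - 1) t
      else if c = ')' then pvScanBL cs (lvl + 1) t
      else if c = '&' ∨ c = '|' then pvScanBL cs lvl t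
      else c :: pvScanBL cs lvl t
    else []

def pvScanFL (cs : List Char) : Nat → Int → Nat → List Char
  | 0, _, _ => []
  | f + 1, lvl, tmp =>
    if 0 ≤ lvl ∧ tmp < cs.length then
      let c := cs.getD tmp ' '
      if c = '(' then pvScanFL cs f (lvl + 1) (tmp + 1)
      else if c = ')' then pvScanFL cs f (lvl - 1) (tmp + 1)
      else if c = '&' ∨ c = '|' then pvScanFL cs f lvl (tmp + 1)
      else c :: pvScanFL cs f lvl (tmp + 1)
    else []

theorem pvScanB_update (cs : List Char) :
    ∀ (t : Nat) (lvl : Int) (s : PySem.Set Char),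
      pvScanB cs lvl t s = PySem.Set.update s (pvScanBL cs lvl t) := by
  intro t
  induction t with
  | zero => intro lvl s; simp [pvScanB, pvScanBL, PySem.Set.update_nil]
  | succ t ih =>
    intro lvl s
    simp only [pvScanB, pvScanBL]
    split_ifs with h1 h2 h3 h4
    · exact ih _ _
    · exact ih _ _
    · exact ih _ _
    · rw [PySem.Set.update_cons]; exact ih _ _
    · simp [PySem.Set.update_nil]

theorem pvScanF_update (cs : List Char) :
    ∀ (f : Nat) (lvl : Int) (tmp : Nat) (s : PySem.Set Char),
      pvScanFGo cs f lvl tmp s = PySem.Set.update s (pvScanFL cs f lvl tmp) := by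
  intro f
  induction f with
  | zero => intro lvl tmp s; simp [pvScanFGo, pvScanFL, PySem.Set.update_nil]
  | succ f ih =>
    intro lvl tmp s
    simp only [pvScanFGo, pvScanFL]
    split_ifs with h1 h2 h3 h4
    · exact ih _ _ _
    · exact ih _ _ _
    · exact ih _ _ _
    · rw [PySem.Set.update_cons]; exact ih _ _ _
    · simp [PySem.Set.update_nil]

theorem pvScanBL_neg (cs : List Char) (lvl : Int) (t : Nat) (h : lvl < 0) :
    pvScanBL cs lvl t = [] := by
  cases t <;> simp [pvScanBL] <;> omega

theorem pvScanFL_neg (cs : List Char) (f : Nat) (lvl : Int) (tmp : Nat) (h : lvl < 0) :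
    pvScanFL cs f lvl tmp = [] := by
  cases f <;> simp [pvScanFL] <;> omega

-- ---------- stop positions ----------
def pvDescIdx (lo : Nat) : Nat → List Nat
  | 0 => if lo = 0 then [0] else []
  | t + 1 => if lo ≤ t + 1 then (t + 1) :: pvDescIdx lo t else []

def pvBS (cs : List Char) (M : Int) (i : Nat) : Nat :=
  Nat.findGreatest (fun k => pvBal cs k < M) i

def pvFS (cs : List Char) (M : Int) : Nat → Nat → Nat
  | 0, tmp => tmp
  | f + 1, tmp => if pvBal cs tmp < M then tmp else pvFS cs M f (tmp + 1)

theorem pvDescIdx_nil (lo t : Nat) (h : t < lo) : pvDescIdx lo t = [] := by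
  cases t <;> simp [pvDescIdx] <;> omega

theorem pvFS_ge (cs : List Char) (M : Int) : ∀ (f tmp : Nat), tmp ≤ pvFS cs M f tmp := by
  intro f
  induction f with
  | zero => intro tmp; simp [pvFS]
  | succ f ih =>
    intro tmp
    rw [pvFS]
    split_ifs
    · omega
    · have := ih (tmp + 1); omega

theorem pvFS_of_lt (cs : List Char) (M : Int) (f tmp : Nat) (h : pvBal cs tmp < M) :
    pvFS cs M f tmp = tmp := by
  cases f <;> simp [pvFS, h]

theorem pvFS_below (cs : List Char) (M : Int) :
    ∀ (f tmp : Nat), pvFS cs M f tmp < tmp + f → pvBal cs (pvFS cs M f tmp) < M := by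
  intro f
  induction f with
  | zero => intro tmp h; simp [pvFS] at h
  | succ f ih =>
    intro tmp h
    rw [pvFS] at h ⊢
    split_ifs at h ⊢ with hb
    · exact hb
    · exact ih (tmp + 1) (by omega)

-- ---------- B's balance array and pass 1 ----------
theorem pvBalArr_eq (cs : List Char) :
    pvBalArr cs = (List.range (cs.length + 1)).map (fun k => pvBal cs k) := by
  have main : ∀ m, m ≤ cs.length →
      (List.range m).foldl
        (fun b j => b ++ [b.getD j 0 +
          ((if cs.getD j ' ' = '(' then (1 : Int) else 0) - (if cs.getD j ' ' = ')' then 1 else 0))])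
        [0] = (List.range (m + 1)).map (fun k => pvBal cs k) := by
    intro m
    induction m with
    | zero => intro _; simp [pvBal]
    | succ m ih =>
      intro hm
      rw [List.range_succ, List.foldl_append, ih (by omega), List.foldl_cons, List.foldl_nil]
      have hget : ((List.range (m + 1)).map (fun k => pvBal cs k)).getD m 0 = pvBal cs m := by
        simp [List.getD]
      rw [hget]
      have hval : pvBal cs m +
          ((if cs.getD m ' ' = '(' then (1 : Int) else 0) - (if cs.getD m ' ' = ')' then 1 else 0))
          = pvBal cs (m + 1) := by
        rw [pvBal_succ cs m (by omega)]; rfl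
      rw [hval, List.range_succ (n := m + 1), List.map_append]
      rfl
  exact main cs.length (le_refl _)

theorem pvBalArr_getD (cs : List Char) (k : Nat) (h : k ≤ cs.length) :
    (pvBalArr cs).getD k 0 = pvBal cs k := by
  rw [pvBalArr_eq]
  simp [List.getD, Nat.lt_succ_of_le h]

def pvP1 (cs : List Char) (m : Nat) : PySem.Dict Int Int × PySem.Dict Int Int :=
  (List.range m).foldl (pvStep1 cs (pvBalArr cs)) (PySem.Dict.empty, PySem.Dict.empty)

theorem pvP1_unroll (cs : List Char) (m : Nat) :
    pvP1 cs (m + 1) = pvStep1 cs (pvBalArr cs) (pvP1 cs m) m := by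
  unfold pvP1
  rw [List.range_succ, List.foldl_append, List.foldl_cons, List.foldl_nil]

theorem pvP1_lb_getD (cs : List Char) :
    ∀ m, m ≤ cs.length → ∀ (v d : Int),
      ((pvP1 cs (m + 1)).1).getD v d
        = if ∃ k, k ≤ m ∧ pvBal cs k = v
          then ((Nat.findGreatest (fun k => pvBal cs k = v) m : Nat) : Int) else d := by
  intro m
  induction m with
  | zero =>
    intro _ v d
    rw [pvP1_unroll]
    simp only [pvStep1]
    rw [pvBalArr_getD cs 0 (by omega)]
    rw [PySem.Dict.getD_insert]
    by_cases hv : v = pvBal cs 0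
    · rw [if_pos hv, if_pos ⟨0, le_refl _, hv.symm⟩]
      simp [Nat.findGreatest]
    · rw [if_neg hv, if_neg]
      · rfl
      · rintro ⟨k, hk, hbal⟩
        have : k = 0 := by omega
        subst this
        exact hv hbal.symm
  | succ m ih =>
    intro hm v d
    rw [pvP1_unroll]
    simp only [pvStep1]
    rw [pvBalArr_getD cs (m + 1) hm]
    rw [PySem.Dict.getD_insert]
    by_cases hv : v = pvBal cs (m + 1)
    · rw [if_pos hv, if_pos ⟨m + 1, le_refl _, hv.symm⟩, Nat.findGreatest_succ,
        if_pos hv.symm]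
    · have hiff : (∃ k, k ≤ m + 1 ∧ pvBal cs k = v) ↔ (∃ k, k ≤ m ∧ pvBal cs k = v) := by
        constructor
        · rintro ⟨k, hk, hb⟩
          rcases Nat.lt_or_ge k (m + 1) with h | h
          · exact ⟨k, by omega, hb⟩
          · have : k = m + 1 := by omega
            subst this
            exact absurd hb.symm hv
        · rintro ⟨k, hk, hb⟩
          exact ⟨k, by omega, hb⟩
      rw [if_neg hv, ih (by omega) v d, Nat.findGreatest_succ,
        if_neg (show ¬ pvBal cs (m + 1) = v from fun h => hv h.symm)]
      by_cases hex : ∃ k, k ≤ m ∧ pvBal cs k = v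
      · rw [if_pos hex, if_pos (hiff.mpr hex)]
      · rw [if_neg hex, if_neg (fun h => hex (hiff.mp h))]

-- the dictionary's last index below the level equals the backward scan's stop
theorem pvBS_eq_eqFind (cs : List Char) (i : Nat) (M : Int) (hM : M ≤ pvBal cs i) :
    (if ∃ k, k ≤ i ∧ pvBal cs k = M - 1
      then ((Nat.findGreatest (fun k => pvBal cs k = M - 1) i : Nat) : Int) else 0)
      = ((pvBS cs M i : Nat) : Int) := by
  by_cases hex : ∃ k, k ≤ i ∧ pvBal cs k = M - 1
  · rw [if_pos hex]
    obtain ⟨k, hk, hbk⟩ := hex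
    have hQg : pvBal cs (Nat.findGreatest (fun k => pvBal cs k = M - 1) i) = M - 1 :=
      Nat.findGreatest_spec (P := fun k => pvBal cs k = M - 1) hk hbk
    set g := Nat.findGreatest (fun k => pvBal cs k = M - 1) i with hgdef
    have hPb : pvBal cs (pvBS cs M i) < M := by
      unfold pvBS
      exact Nat.findGreatest_spec (P := fun k => pvBal cs k < M) hk (by omega)
    have hgb : g ≤ pvBS cs M i := by
      unfold pvBS
      exact Nat.le_findGreatest (P := fun k => pvBal cs k < M)
        (hgdef ▸ Nat.findGreatest_le i) (by omega)
    have hbi : pvBS cs M i ≠ i := fun h => by rw [h] at hPb; omega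
    have hble : pvBS cs M i ≤ i := Nat.findGreatest_le i
    have hnb : ¬ pvBal cs (pvBS cs M i + 1) < M := by
      have := Nat.findGreatest_is_greatest (P := fun k => pvBal cs k < M)
        (n := i) (k := pvBS cs M i + 1) (by unfold pvBS; omega) (by omega)
      exact this
    have h1 := pvBal_step_le cs (pvBS cs M i)
    have h2 := pvBal_step_ge cs (pvBS cs M i)
    have hQb : pvBal cs (pvBS cs M i) = M - 1 := by omega
    have hbg : pvBS cs M i ≤ g :=
      Nat.le_findGreatest (P := fun k => pvBal cs k = M - 1) hble hQb
    have : g = pvBS cs M i := by omega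
    rw [this]
  · rw [if_neg hex]
    have hb0 : pvBS cs M i = 0 := by
      by_contra hb
      have hne : ∃ k, 0 < k ∧ k ≤ i ∧ pvBal cs k < M := by
        by_contra hno
        push_neg at hno
        exact hb (Nat.findGreatest_eq_zero_iff.mpr (fun {k} h1 h2 => by
          intro hP
          exact absurd hP (by
            have := hno k h1 h2
            omega)))
      obtain ⟨k, hk0, hki, hPk⟩ := hne
      have hPb : pvBal cs (pvBS cs M i) < M :=
        Nat.findGreatest_spec (P := fun k => pvBal cs k < M) hki hPk
      have hbi : pvBS cs M i ≠ i := fun h => by rw [h] at hPb; omega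
      have hble : pvBS cs M i ≤ i := Nat.findGreatest_le i
      have hnb : ¬ pvBal cs (pvBS cs M i + 1) < M := by
        have := Nat.findGreatest_is_greatest (P := fun k => pvBal cs k < M)
          (n := i) (k := pvBS cs M i + 1) (by unfold pvBS; omega) (by omega)
        exact this
      have h1 := pvBal_step_le cs (pvBS cs M i)
      have h2 := pvBal_step_ge cs (pvBS cs M i)
      exact hex ⟨pvBS cs M i, hble, by omega⟩
    rw [hb0]
    rfl

theorem pvStartVal (cs : List Char) (i : Nat) (hi : i ≤ cs.length) :
    ((pvP1 cs (i + 1)).1).getD (pvBal cs i - 1) 0 = ((pvBS cs (pvBal cs i) i : Nat) : Int) := by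
  rw [pvP1_lb_getD cs i hi (pvBal cs i - 1) 0]
  exact pvBS_eq_eqFind cs i (pvBal cs i) (le_refl _)

theorem pvP1_starts (cs : List Char) :
    ∀ m, m ≤ cs.length →
      (∀ i : Nat, i ≤ m →
        ((pvP1 cs (m + 1)).2).get? ((i : Nat) : Int)
          = if i < cs.length ∧ cs.getD i ' ' = '|'
            then some (((pvBS cs (pvBal cs i) i : Nat) : Int)) else none) ∧
      (∀ j : Nat, m < j → ((pvP1 cs (m + 1)).2).get? ((j : Nat) : Int) = none) := by
  intro m
  induction m with
  | zero =>
    intro hm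
    have h1 : (pvP1 cs 1).1
        = ((pvP1 cs 0).1).insert ((pvBalArr cs).getD 0 0) ((0 : Nat) : Int) := by
      rw [pvP1_unroll]; rfl
    have hstep : (pvP1 cs 1).2
        = if 0 < cs.length ∧ cs.getD 0 ' ' = '|'
          then (PySem.Dict.empty (κ := Int) (ν := Int)).insert ((0 : Nat) : Int)
            (((pvP1 cs 1).1).getD (pvBal cs 0 - 1) 0)
          else PySem.Dict.empty := by
      conv_lhs => rw [pvP1_unroll]
      simp only [pvStep1]
      rw [← h1, pvBalArr_getD cs 0 (by omega)]
      rfl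
    constructor
    · intro i hi
      have hi0 : i = 0 := by omega
      subst hi0
      rw [hstep]
      by_cases hc : 0 < cs.length ∧ cs.getD 0 ' ' = '|'
      · rw [if_pos hc, if_pos hc, PySem.Dict.get?_insert_self,
          pvStartVal cs 0 (by omega)]
      · rw [if_neg hc, if_neg hc, PySem.Dict.get?_empty]
    · intro j hj
      rw [hstep]
      by_cases hc : 0 < cs.length ∧ cs.getD 0 ' ' = '|'
      · rw [if_pos hc, PySem.Dict.get?_insert, if_neg (by push_cast; omega),
          PySem.Dict.get?_empty]
      · rw [if_neg hc, PySem.Dict.get?_empty]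
  | succ m ih =>
    intro hm
    have ih1 := (ih (by omega)).1
    have ih2 := (ih (by omega)).2
    have h1 : (pvP1 cs (m + 1 + 1)).1
        = ((pvP1 cs (m + 1)).1).insert ((pvBalArr cs).getD (m + 1) 0) (((m + 1 : Nat)) : Int) := by
      rw [pvP1_unroll]; rfl
    have hstep : (pvP1 cs (m + 1 + 1)).2
        = if m + 1 < cs.length ∧ cs.getD (m + 1) ' ' = '|'
          then ((pvP1 cs (m + 1)).2).insert (((m + 1 : Nat)) : Int)
            (((pvP1 cs (m + 1 + 1)).1).getD (pvBal cs (m + 1) - 1) 0)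
          else (pvP1 cs (m + 1)).2 := by
      conv_lhs => rw [pvP1_unroll]
      simp only [pvStep1]
      rw [← h1, pvBalArr_getD cs (m + 1) hm]
    constructor
    · intro i hi
      rw [hstep]
      by_cases hc : m + 1 < cs.length ∧ cs.getD (m + 1) ' ' = '|'
      · rw [if_pos hc]
        rcases Nat.lt_or_ge i (m + 1) with hlt | hge
        · rw [PySem.Dict.get?_insert, if_neg (by push_cast; omega)]
          exact ih1 i (by omega)
        · have hieq : i = m + 1 := by omega
          subst hieq
          rw [PySem.Dict.get?_insert, if_pos rfl, if_pos hc,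
            pvStartVal cs (m + 1) hm]
      · rw [if_neg hc]
        rcases Nat.lt_or_ge i (m + 1) with hlt | hge
        · exact ih1 i (by omega)
        · have hieq : i = m + 1 := by omega
          subst hieq
          rw [ih2 (m + 1) (by omega), if_neg hc]
    · intro j hj
      rw [hstep]
      by_cases hc : m + 1 < cs.length ∧ cs.getD (m + 1) ' ' = '|'
      · rw [if_pos hc, PySem.Dict.get?_insert, if_neg (by push_cast; omega)]
        exact ih2 j (by omega)
      · rw [if_neg hc]
        exact ih2 j (by omega)


-- ---------- B's pass 2: next index below the level ----------
theorem pvFS_eq_find (cs : List Char) (M : Int) :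
    ∀ (f m : Nat), f + m = cs.length → M ≤ pvBal cs m →
      ((pvFS cs M f m : Nat) : Int)
        = min ((((List.range' (m + 1) f).find? (fun x => decide (pvBal cs x = M - 1))).map
            (fun x : Nat => (x : Int))).getD ((cs.length : Int) + 1)) (cs.length : Int) := by
  intro f
  induction f with
  | zero =>
    intro m hf hM
    simp only [pvFS, List.range'_zero, List.find?_nil, Option.map_none, Option.getD_none]
    rw [min_eq_right (by omega)]
    omega
  | succ f ih =>
    intro m hf hM
    have hin : m < cs.length := by omega
    have hfs : pvFS cs M (f + 1) m = pvFS cs M f (m + 1) := by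
      rw [pvFS, if_neg (by omega)]
    rw [hfs, List.range'_succ]
    by_cases hlt : pvBal cs (m + 1) < M
    · have hstep := pvBal_step_ge cs m
      have hQ : pvBal cs (m + 1) = M - 1 := by omega
      rw [List.find?_cons_of_pos (by simp [hQ])]
      rw [pvFS_of_lt cs M f (m + 1) hlt]
      simp only [Option.map_some, Option.getD_some]
      rw [min_eq_left (by push_cast; omega)]
    · rw [List.find?_cons_of_neg (by simp; omega)]
      exact ih (m + 1) (by omega) (by omega)

def pvP2Go (cs : List Char) (m : Nat) (st : PySem.Dict Int Int × PySem.Dict Int Int) :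
    PySem.Dict Int Int × PySem.Dict Int Int :=
  (PySem.List.pyRange ((m : Nat) : Int) (-1) (-1)).foldl (pvStep2 cs (pvBalArr cs)) st

theorem pvP2Go_zero (cs : List Char) (st : PySem.Dict Int Int × PySem.Dict Int Int) :
    pvP2Go cs 0 st = pvStep2 cs (pvBalArr cs) st 0 := by
  unfold pvP2Go
  rw [show ((0 : Nat) : Int) = (0 : Int) by rfl]
  rw [PySem.List.pyRange_neg_one_cons (by omega)]
  rw [show (0 : Int) - 1 = -1 by rfl]
  rw [PySem.List.pyRange_neg_one_eq_nil (by omega)]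
  rfl

theorem pvP2Go_unroll (cs : List Char) (m : Nat) (st : PySem.Dict Int Int × PySem.Dict Int Int) :
    pvP2Go cs (m + 1) st = pvP2Go cs m (pvStep2 cs (pvBalArr cs) st (((m + 1 : Nat)) : Int)) := by
  unfold pvP2Go
  rw [PySem.List.pyRange_neg_one_cons (by push_cast; omega)]
  rw [show ((m + 1 : Nat) : Int) - 1 = ((m : Nat) : Int) by push_cast; omega]
  rfl

-- the two invariants carried down pass 2
def pvInvNB (cs : List Char) (d : PySem.Dict Int Int) (t : Nat) : Prop :=
  ∀ v : Int, d.get? v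
    = ((List.range' t (cs.length + 1 - t)).find? (fun x => decide (pvBal cs x = v))).map
        (fun x : Nat => (x : Int))

def pvInvST (cs : List Char) (d : PySem.Dict Int Int) (t : Nat) : Prop :=
  ∀ i : Nat, d.get? ((i : Nat) : Int)
    = if t ≤ i ∧ i < cs.length ∧ cs.getD i ' ' = '|'
      then some (min ((((List.range' (i + 1) (cs.length - i)).find?
            (fun x => decide (pvBal cs x = pvBal cs i - 1))).map
            (fun x : Nat => (x : Int))).getD ((cs.length : Int) + 1)) (cs.length : Int))
      else none

theorem pvP2_step (cs : List Char) (k : Nat) (hk : k ≤ cs.length)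
    (st : PySem.Dict Int Int × PySem.Dict Int Int)
    (h1 : pvInvNB cs st.1 (k + 1)) (h2 : pvInvST cs st.2 (k + 1)) :
    pvInvNB cs (pvStep2 cs (pvBalArr cs) st ((k : Nat) : Int)).1 k ∧
    pvInvST cs (pvStep2 cs (pvBalArr cs) st ((k : Nat) : Int)).2 k := by
  have hbal : PySem.List.pyGetD (pvBalArr cs) ((k : Nat) : Int) 0 = pvBal cs k := by
    rw [PySem.List.pyGetD_natCast, pvBalArr_getD cs k hk]
  have hchar : PySem.List.pyGetD cs ((k : Nat) : Int) ' ' = cs.getD k ' ' := by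
    rw [PySem.List.pyGetD_natCast]
  have hrange : List.range' k (cs.length + 1 - k) = k :: List.range' (k + 1) (cs.length - k) := by
    rw [show cs.length + 1 - k = (cs.length - k) + 1 by omega, List.range'_succ]
  constructor
  · intro v
    show (st.1.insert (PySem.List.pyGetD (pvBalArr cs) ((k : Nat) : Int) 0) ((k : Nat) : Int)).get? v = _
    rw [hbal, hrange, PySem.Dict.get?_insert]
    by_cases hv : v = pvBal cs k
    · rw [if_pos hv, List.find?_cons_of_pos (by simp [hv])]
      rfl
    · rw [if_neg hv, List.find?_cons_of_neg (by simp; exact fun h => hv h.symm), h1 v,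
        show cs.length + 1 - (k + 1) = cs.length - k by omega]
  · intro i
    show (if ((k : Nat) : Int) < (cs.length : Int) ∧ PySem.List.pyGetD cs ((k : Nat) : Int) ' ' = '|'
      then st.2.insert ((k : Nat) : Int)
        (min (st.1.getD (PySem.List.pyGetD (pvBalArr cs) ((k : Nat) : Int) 0 - 1) ((cs.length : Int) + 1)) (cs.length : Int))
      else st.2).get? ((i : Nat) : Int) = _
    rw [hbal, hchar]
    have hval : st.1.getD (pvBal cs k - 1) ((cs.length : Int) + 1)
        = (((List.range' (k + 1) (cs.length - k)).find?
            (fun x => decide (pvBal cs x = pvBal cs k - 1))).map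
            (fun x : Nat => (x : Int))).getD ((cs.length : Int) + 1) := by
      rw [PySem.Dict.getD_eq_get?_getD, h1 (pvBal cs k - 1)]
      rw [show cs.length + 1 - (k + 1) = cs.length - k by omega]
    by_cases hc : k < cs.length ∧ cs.getD k ' ' = '|'
    · rw [if_pos ⟨by exact_mod_cast Int.ofNat_lt.mpr hc.1, hc.2⟩]
      by_cases hik : i = k
      · subst hik
        rw [PySem.Dict.get?_insert_self, if_pos ⟨le_refl _, hc⟩, hval]
      · rw [PySem.Dict.get?_insert, if_neg (by push_cast; omega), h2 i]
        by_cases ha : k + 1 ≤ i ∧ i < cs.length ∧ cs.getD i ' ' = '|'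
        · rw [if_pos ha, if_pos ⟨by omega, ha.2⟩]
        · by_cases hb : k ≤ i ∧ i < cs.length ∧ cs.getD i ' ' = '|'
          · exact absurd ⟨by omega, hb.2⟩ ha
          · rw [if_neg ha, if_neg hb]
    · rw [if_neg (fun h => hc ⟨by exact_mod_cast h.1, h.2⟩)]
      rw [h2 i]
      by_cases ha : k + 1 ≤ i ∧ i < cs.length ∧ cs.getD i ' ' = '|'
      · rw [if_pos ha, if_pos ⟨by omega, ha.2⟩]
      · by_cases hb : k ≤ i ∧ i < cs.length ∧ cs.getD i ' ' = '|'
        · rcases eq_or_ne i k with rfl | hne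
          · exact absurd hb.2 hc
          · exact absurd ⟨by omega, hb.2⟩ ha
        · rw [if_neg ha, if_neg hb]

theorem pvP2_run (cs : List Char) :
    ∀ (m : Nat) (st : PySem.Dict Int Int × PySem.Dict Int Int), m < cs.length + 1 →
      pvInvNB cs st.1 (m + 1) → pvInvST cs st.2 (m + 1) →
      pvInvNB cs (pvP2Go cs m st).1 0 ∧ pvInvST cs (pvP2Go cs m st).2 0 := by
  intro m
  induction m with
  | zero =>
    intro st hm h1 h2
    rw [pvP2Go_zero]
    exact pvP2_step cs 0 (by omega) st h1 h2
  | succ m ih =>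
    intro st hm h1 h2
    rw [pvP2Go_unroll]
    have hstep := pvP2_step cs (m + 1) (by omega) st h1 h2
    exact ih _ (by omega) hstep.1 hstep.2

theorem pvStops (cs : List Char) (i : Nat) (hi : i < cs.length) (hbar : cs.getD i ' ' = '|') :
    ((pvP2Go cs cs.length (PySem.Dict.empty, PySem.Dict.empty)).2).get? ((i : Nat) : Int)
      = some ((pvFS cs (pvBal cs i) (cs.length - i) i : Nat) : Int) := by
  have hinit1 : pvInvNB cs (PySem.Dict.empty (κ := Int) (ν := Int)) (cs.length + 1) := by
    intro v
    rw [PySem.Dict.get?_empty, Nat.sub_self, List.range'_zero, List.find?_nil]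
    rfl
  have hinit2 : pvInvST cs (PySem.Dict.empty (κ := Int) (ν := Int)) (cs.length + 1) := by
    intro j
    rw [PySem.Dict.get?_empty, if_neg (by omega)]
  have hrun := (pvP2_run cs cs.length (PySem.Dict.empty, PySem.Dict.empty) (by omega) hinit1 hinit2).2
  rw [hrun i, if_pos ⟨by omega, hi, hbar⟩]
  rw [pvFS_eq_find cs (pvBal cs i) (cs.length - i) i (by omega) (le_refl _)]

theorem pvP1_keys (cs : List Char) :
    ∀ m, m ≤ cs.length →
      (pvP1 cs (m + 1)).2.keys
        = ((List.range (m + 1)).filter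
            (fun k => decide (k < cs.length) && decide (cs.getD k ' ' = '|'))).map
            (fun k : Nat => (k : Int)) := by
  intro m
  induction m with
  | zero =>
    intro hm
    have h1 : (pvP1 cs 1).1
        = ((pvP1 cs 0).1).insert ((pvBalArr cs).getD 0 0) ((0 : Nat) : Int) := by
      rw [pvP1_unroll]; rfl
    have hstep : (pvP1 cs 1).2
        = if 0 < cs.length ∧ cs.getD 0 ' ' = '|'
          then (PySem.Dict.empty (κ := Int) (ν := Int)).insert ((0 : Nat) : Int)
            (((pvP1 cs 1).1).getD (pvBal cs 0 - 1) 0)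
          else PySem.Dict.empty := by
      conv_lhs => rw [pvP1_unroll]
      simp only [pvStep1]
      rw [← h1, pvBalArr_getD cs 0 (by omega)]
      rfl
    rw [hstep]
    rw [List.range_one]
    by_cases hc : 0 < cs.length ∧ cs.getD 0 ' ' = '|'
    · rw [if_pos hc,
        PySem.Dict.keys_insert_of_not_contains _ _ (PySem.Dict.contains_empty _),
        PySem.Dict.keys_empty, List.filter_singleton,
        show (decide (0 < cs.length) && decide (cs.getD 0 ' ' = '|')) = true by
          simp only [hc.1, hc.2, decide_true, Bool.and_self]]
      rfl
    · rw [if_neg hc, PySem.Dict.keys_empty, List.filter_singleton,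
        show (decide (0 < cs.length) && decide (cs.getD 0 ' ' = '|')) = false by
          simp only [Bool.and_eq_true, decide_eq_true_eq, ← Bool.not_eq_true]
          simpa using hc]
      rfl
  | succ m ih =>
    intro hm
    have h1 : (pvP1 cs (m + 1 + 1)).1
        = ((pvP1 cs (m + 1)).1).insert ((pvBalArr cs).getD (m + 1) 0) (((m + 1 : Nat)) : Int) := by
      rw [pvP1_unroll]; rfl
    have hstep : (pvP1 cs (m + 1 + 1)).2
        = if m + 1 < cs.length ∧ cs.getD (m + 1) ' ' = '|'
          then ((pvP1 cs (m + 1)).2).insert (((m + 1 : Nat)) : Int)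
            (((pvP1 cs (m + 1 + 1)).1).getD (pvBal cs (m + 1) - 1) 0)
          else (pvP1 cs (m + 1)).2 := by
      conv_lhs => rw [pvP1_unroll]
      simp only [pvStep1]
      rw [← h1, pvBalArr_getD cs (m + 1) hm]
    rw [hstep, List.range_succ (n := m + 1), List.filter_append, List.map_append]
    by_cases hc : m + 1 < cs.length ∧ cs.getD (m + 1) ' ' = '|'
    · have hfresh : (pvP1 cs (m + 1)).2.contains (((m + 1 : Nat)) : Int) = false := by
        have := (pvP1_starts cs m (by omega)).2 (m + 1) (by omega)
        rw [PySem.Dict.contains_eq_isSome_get?, this]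
        rfl
      rw [if_pos hc, PySem.Dict.keys_insert_of_not_contains _ _ hfresh, ih (by omega)]
      congr 1
      rw [List.filter_singleton,
        show (decide (m + 1 < cs.length) && decide (cs.getD (m + 1) ' ' = '|')) = true by
          simp only [hc.1, hc.2, decide_true, Bool.and_self]]
      rfl
    · rw [if_neg hc, ih (by omega)]
      rw [List.filter_singleton,
        show (decide (m + 1 < cs.length) && decide (cs.getD (m + 1) ' ' = '|')) = false by
          simp only [Bool.and_eq_true, decide_eq_true_eq, ← Bool.not_eq_true]
          simpa using hc]
      simp

-- ---------- loop-shape and range conversions ----------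
theorem pvFoldAddIf {α : Type} (g : α → Char) :
    ∀ (l : List α) (s : PySem.Set Char),
      l.foldl (fun o j => if pvKeep (g j) then PySem.Set.add o (g j) else o) s
        = PySem.Set.update s ((l.map g).filter pvKeep) := by
  intro l
  induction l with
  | nil => intro s; simp [PySem.Set.update_nil]
  | cons a l ih =>
    intro s
    rw [List.foldl_cons, List.map_cons, List.filter_cons]
    by_cases hk : pvKeep (g a)
    · rw [if_pos hk, if_pos hk, PySem.Set.update_cons]
      exact ih _
    · rw [if_neg hk, if_neg (by simp [hk])]
      exact ih _

theorem pvPyRangeDesc : ∀ (i a : Nat),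
    PySem.List.pyRange ((i : Nat) : Int) (((a : Nat) : Int) - 1) (-1)
      = (pvDescIdx a i).map (fun k : Nat => (k : Int)) := by
  intro i
  induction i with
  | zero =>
    intro a
    cases a with
    | zero =>
      rw [PySem.List.pyRange_neg_one_cons (by omega)]
      rw [PySem.List.pyRange_neg_one_eq_nil (by omega)]
      rfl
    | succ a =>
      rw [PySem.List.pyRange_neg_one_eq_nil (by push_cast; omega)]
      rw [pvDescIdx_nil _ _ (by omega)]
      rfl
  | succ i ih =>
    intro a
    by_cases ha : a ≤ i + 1
    · rw [PySem.List.pyRange_neg_one_cons (by push_cast; omega)]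
      rw [show ((i + 1 : Nat) : Int) - 1 = ((i : Nat) : Int) by push_cast; omega, ih a]
      rw [pvDescIdx, if_pos ha]
      rfl
    · rw [PySem.List.pyRange_neg_one_eq_nil (by push_cast; omega)]
      rw [pvDescIdx_nil _ _ (by omega)]
      rfl

theorem pvPyRangeAsc (s e : Nat) :
    PySem.List.pyRange ((s : Nat) : Int) ((e : Nat) : Int) 1
      = (List.range' s (e - s)).map (fun k : Nat => (k : Int)) := by
  rw [PySem.List.pyRange_one, List.range'_eq_map_range]
  rw [show (((e : Nat) : Int) - ((s : Nat) : Int)).toNat = e - s by omega]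
  rw [List.map_map]
  apply List.map_congr_left
  intro k _
  simp

theorem pvDescIdx_mem : ∀ (t lo j : Nat), j ∈ pvDescIdx lo t ↔ lo ≤ j ∧ j ≤ t := by
  intro t
  induction t with
  | zero =>
    intro lo j
    cases lo with
    | zero => simp [pvDescIdx]
    | succ lo => simp [pvDescIdx]; omega
  | succ t ih =>
    intro lo j
    rw [pvDescIdx]
    by_cases hlo : lo ≤ t + 1
    · rw [if_pos hlo]
      simp only [List.mem_cons, ih lo j]
      omega
    · rw [if_neg hlo]
      simp only [List.not_mem_nil, false_iff]
      omega

theorem pvUpdate_eq_self (s : PySem.Set Char) (l : List Char) (h : ∀ c ∈ l, c ∈ s) :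
    PySem.Set.update s l = s := by
  rw [PySem.Set.update_eq_append_filter]
  have : (PySem.Set.ofList l).filter (fun y => !(PySem.Set.contains s y)) = [] := by
    rw [List.filter_eq_nil_iff]
    intro c hc
    have : c ∈ s := h c ((PySem.Set.mem_ofList _ _).mp hc)
    simp [PySem.Set.contains_eq_listContains]
    exact this
  rw [this, List.append_nil]

-- ---------- backward scan characterization ----------
theorem pvScanBL_char (cs : List Char) :
    ∀ (t : Nat) (M : Int), M ≤ pvBal cs (t + 1) →
      pvScanBL cs (pvBal cs (t + 1) - M) t
        = ((pvDescIdx (max (pvBS cs M t) 1) t).map (fun j => cs.getD j ' ')).filter pvKeep := by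
  intro t
  induction t with
  | zero =>
    intro M hM
    simp [pvScanBL, pvBS, Nat.findGreatest, pvDescIdx]
  | succ t ih =>
    intro M hM
    have hlvl : 0 ≤ pvBal cs (t + 1 + 1) - M := by omega
    by_cases hM1 : M ≤ pvBal cs (t + 1)
    · -- scan continues past position t+1
      have hbs : pvBS cs M (t + 1) = pvBS cs M t := by
        unfold pvBS
        rw [Nat.findGreatest_succ]
        simp only [if_neg (by omega : ¬ pvBal cs (t + 1) < M)]
      have hlo : max (pvBS cs M t) 1 ≤ t + 1 := by
        have := Nat.findGreatest_le (P := fun k => pvBal cs k < M) t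
        simp only [pvBS]; omega
      have hdesc : pvDescIdx (max (pvBS cs M (t+1)) 1) (t + 1)
          = (t + 1) :: pvDescIdx (max (pvBS cs M t) 1) t := by
        rw [hbs, pvDescIdx, if_pos hlo]
      rw [hdesc]
      rw [pvScanBL]
      simp only [if_pos hlvl]
      by_cases hc1 : cs.getD (t + 1) ' ' = '('
      · have hin : t + 1 < cs.length := by
          by_contra hn
          have : cs.getD (t + 1) ' ' = ' ' := List.getD_eq_default _ _ (by omega)
          rw [this] at hc1; exact absurd hc1 (by decide)
        have hb2 : pvBal cs (t + 1 + 1) = pvBal cs (t + 1) + 1 := by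
          rw [pvBal_succ cs (t + 1) hin, hc1]; simp [pvDelta]
        have : pvBal cs (t + 1 + 1) - M - 1 = pvBal cs (t + 1) - M := by omega
        rw [if_pos hc1, this, ih M hM1, List.map_cons,
          List.filter_cons_of_neg (by rw [hc1]; decide)]
      · by_cases hc2 : cs.getD (t + 1) ' ' = ')'
        · have hin : t + 1 < cs.length := by
            by_contra hn
            have : cs.getD (t + 1) ' ' = ' ' := List.getD_eq_default _ _ (by omega)
            rw [this] at hc2; exact absurd hc2 (by decide)
          have hb2 : pvBal cs (t + 1 + 1) = pvBal cs (t + 1) - 1 := by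
            rw [pvBal_succ cs (t + 1) hin, hc2]; simp [pvDelta]; try omega
          have : pvBal cs (t + 1 + 1) - M + 1 = pvBal cs (t + 1) - M := by omega
          rw [if_neg hc1, if_pos hc2, this, ih M hM1, List.map_cons,
            List.filter_cons_of_neg (by rw [hc2]; decide)]
        · have hb2 : pvBal cs (t + 1 + 1) = pvBal cs (t + 1) := by
            by_cases hin : t + 1 < cs.length
            · rw [pvBal_succ cs (t + 1) hin]
              unfold pvDelta; rw [if_neg hc1, if_neg hc2]; omega
            · exact pvBal_succ_ge cs (t + 1) (by omega)
          rw [if_neg hc1, if_neg hc2]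
          by_cases hc3 : cs.getD (t + 1) ' ' = '&' ∨ cs.getD (t + 1) ' ' = '|'
          · rw [if_pos hc3, hb2, ih M hM1]
            rcases hc3 with hc3 | hc3 <;>
              rw [List.map_cons, List.filter_cons_of_neg (by rw [hc3]; decide)]
          · rw [if_neg hc3, hb2, ih M hM1]
            push_neg at hc3
            rw [List.map_cons, List.filter_cons_of_pos (pvKeep_eq_true hc1 hc2 hc3.1 hc3.2)]
    · -- the scan stops at position t+1, which must be '('
      push_neg at hM1
      have hbs : pvBS cs M (t + 1) = t + 1 := by
        unfold pvBS
        rw [Nat.findGreatest_succ]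
        simp only [if_pos hM1]
      have hin : t + 1 < cs.length := by
        by_contra hn
        have := pvBal_succ_ge cs (t + 1) (by omega)
        omega
      have hc1 : cs.getD (t + 1) ' ' = '(' := by
        apply pvDelta_eq_one
        have := pvBal_succ cs (t + 1) hin
        have h1 := pvDelta_le_one (cs.getD (t + 1) ' ')
        omega
      rw [pvScanBL]
      simp only [if_pos hlvl]
      rw [if_pos hc1]
      have hb2 : pvBal cs (t + 1 + 1) = pvBal cs (t + 1) + 1 := by
        rw [pvBal_succ cs (t + 1) hin, hc1]; simp [pvDelta]
      rw [pvScanBL_neg cs _ t (by omega)]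
      rw [hbs]
      have : pvDescIdx (max (t+1) 1) (t + 1) = (t + 1) :: pvDescIdx (max (t+1) 1) t := by
        rw [pvDescIdx, if_pos (by omega)]
      rw [this, pvDescIdx_nil _ t (by omega), List.map_cons,
        List.filter_cons_of_neg (by rw [hc1]; decide), List.map_nil, List.filter_nil]

-- ---------- forward scan characterization ----------
theorem pvScanFL_char (cs : List Char) :
    ∀ (f tmp : Nat) (M : Int), f + tmp = cs.length → M ≤ pvBal cs tmp →
      pvScanFL cs f (pvBal cs tmp - M) tmp
        = ((List.range' tmp (pvFS cs M f tmp - tmp)).map (fun j => cs.getD j ' ')).filter pvKeep := by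
  intro f
  induction f with
  | zero => intro tmp M hf hM; simp [pvScanFL, pvFS]
  | succ f ih =>
    intro tmp M hf hM
    have hin : tmp < cs.length := by omega
    have hfs : pvFS cs M (f + 1) tmp = pvFS cs M f (tmp + 1) := by
      rw [pvFS, if_neg (by omega)]
    have hge : tmp + 1 ≤ pvFS cs M f (tmp + 1) := pvFS_ge cs M f (tmp + 1)
    have hrange : List.range' tmp (pvFS cs M (f+1) tmp - tmp)
        = tmp :: List.range' (tmp + 1) (pvFS cs M f (tmp + 1) - (tmp + 1)) := by
      rw [hfs]
      have : pvFS cs M f (tmp + 1) - tmp = (pvFS cs M f (tmp + 1) - (tmp + 1)) + 1 := by omega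
      rw [this, List.range'_succ]
    rw [hrange]
    rw [pvScanFL]
    simp only [if_pos (⟨by omega, hin⟩ : 0 ≤ pvBal cs tmp - M ∧ tmp < cs.length)]
    by_cases hc1 : cs.getD tmp ' ' = '('
    · have hb2 : pvBal cs (tmp + 1) = pvBal cs tmp + 1 := by
        rw [pvBal_succ cs tmp hin, hc1]; simp [pvDelta]
      have : pvBal cs tmp - M + 1 = pvBal cs (tmp + 1) - M := by omega
      rw [if_pos hc1, this, ih (tmp + 1) M (by omega) (by omega), List.map_cons,
        List.filter_cons_of_neg (by rw [hc1]; decide)]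
    · by_cases hc2 : cs.getD tmp ' ' = ')'
      · have hb2 : pvBal cs (tmp + 1) = pvBal cs tmp - 1 := by
          rw [pvBal_succ cs tmp hin, hc2]; simp [pvDelta]; try omega
        by_cases hM1 : M ≤ pvBal cs (tmp + 1)
        · have : pvBal cs tmp - M - 1 = pvBal cs (tmp + 1) - M := by omega
          rw [if_neg hc1, if_pos hc2, this, ih (tmp + 1) M (by omega) hM1, List.map_cons,
            List.filter_cons_of_neg (by rw [hc2]; decide)]
        · push_neg at hM1
          rw [if_neg hc1, if_pos hc2]
          rw [pvScanFL_neg cs f _ (tmp + 1) (by omega)]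
          rw [pvFS_of_lt cs M f (tmp + 1) hM1, Nat.sub_self, List.range'_zero, List.map_cons,
            List.filter_cons_of_neg (by rw [hc2]; decide), List.map_nil, List.filter_nil]
      · have hb2 : pvBal cs (tmp + 1) = pvBal cs tmp := by
          rw [pvBal_succ cs tmp hin]
          unfold pvDelta; rw [if_neg hc1, if_neg hc2]; omega
        rw [if_neg hc1, if_neg hc2]
        by_cases hc3 : cs.getD tmp ' ' = '&' ∨ cs.getD tmp ' ' = '|'
        · rw [if_pos hc3]
          rw [show pvBal cs tmp - M = pvBal cs (tmp + 1) - M by omega,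
            ih (tmp + 1) M (by omega) (by omega)]
          rcases hc3 with hc3 | hc3 <;>
            rw [List.map_cons, List.filter_cons_of_neg (by rw [hc3]; decide)]
        · rw [if_neg hc3]
          rw [show pvBal cs tmp - M = pvBal cs (tmp + 1) - M by omega,
            ih (tmp + 1) M (by omega) (by omega)]
          push_neg at hc3
          rw [List.map_cons, List.filter_cons_of_pos (pvKeep_eq_true hc1 hc2 hc3.1 hc3.2)]

-- ---------- emission lists per '|' ----------
def pvABL (cs : List Char) (i : Nat) : List Char :=
  ((pvDescIdx (max (pvBS cs (pvBal cs i) i) 1) i).map (fun j => cs.getD j ' ')).filter pvKeep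

def pvBBL (cs : List Char) (i : Nat) : List Char :=
  ((pvDescIdx (pvBS cs (pvBal cs i) i) i).map (fun j => cs.getD j ' ')).filter pvKeep

def pvFL (cs : List Char) (i : Nat) : List Char :=
  ((List.range' i (pvFS cs (pvBal cs i) (cs.length - i) i - i)).map
    (fun j => cs.getD j ' ')).filter pvKeep

def pvBFL (cs : List Char) (i : Nat) : List Char :=
  ((List.range' (i + 1) (pvFS cs (pvBal cs i) (cs.length - i) i - (i + 1))).map
    (fun j => cs.getD j ' ')).filter pvKeep

theorem pvBal_bar (cs : List Char) (i : Nat) (hi : i < cs.length) (hbar : cs.getD i ' ' = '|') :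
    pvBal cs (i + 1) = pvBal cs i := by
  rw [pvBal_succ cs i hi, hbar]
  have : pvDelta '|' = 0 := by decide
  omega

theorem pvE_ge (cs : List Char) (i : Nat) (hi : i < cs.length) :
    i + 1 ≤ pvFS cs (pvBal cs i) (cs.length - i) i := by
  have h1 : pvFS cs (pvBal cs i) (cs.length - i) i = pvFS cs (pvBal cs i) (cs.length - i - 1) (i + 1) := by
    conv_lhs => rw [show cs.length - i = (cs.length - i - 1) + 1 by omega]
    rw [pvFS, if_neg (by omega)]
  rw [h1]
  exact pvFS_ge cs (pvBal cs i) _ (i + 1)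

-- A's per-'|' step is one Set.update
theorem pvStepA_update (cs : List Char) (i : Nat) (hi : i < cs.length)
    (hbar : cs.getD i ' ' = '|') (s : PySem.Set Char) :
    pvScanF cs 0 i (pvScanB cs 0 i s) = PySem.Set.update s (pvABL cs i ++ pvFL cs i) := by
  have hB : pvScanB cs 0 i s = PySem.Set.update s (pvABL cs i) := by
    rw [pvScanB_update]
    congr 1
    have h0 : (0 : Int) = pvBal cs (i + 1) - pvBal cs i := by
      rw [pvBal_bar cs i hi hbar]; omega
    rw [h0, pvScanBL_char cs i (pvBal cs i) (by rw [pvBal_bar cs i hi hbar])]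
    rfl
  have hF : pvScanF cs 0 (i) (PySem.Set.update s (pvABL cs i))
      = PySem.Set.update (PySem.Set.update s (pvABL cs i)) (pvFL cs i) := by
    unfold pvScanF
    rw [pvScanF_update]
    congr 1
    have h0 : (0 : Int) = pvBal cs i - pvBal cs i := by omega
    rw [h0, pvScanFL_char cs (cs.length - i) i (pvBal cs i) (by omega) (le_refl _)]
    rfl
  rw [hB, hF, ← PySem.Set.update_append]

-- the forward emission drops the '|' itself
theorem pvFL_eq_pvBFL (cs : List Char) (i : Nat) (hi : i < cs.length)
    (hbar : cs.getD i ' ' = '|') : pvFL cs i = pvBFL cs i := by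
  unfold pvFL pvBFL
  have hge := pvE_ge cs i hi
  rw [show pvFS cs (pvBal cs i) (cs.length - i) i - i
      = (pvFS cs (pvBal cs i) (cs.length - i) i - (i + 1)) + 1 by omega, List.range'_succ]
  rw [List.map_cons, List.filter_cons_of_neg (by rw [hbar]; decide)]

theorem pvDescIdx_split0 : ∀ (i : Nat), pvDescIdx 0 i = pvDescIdx 1 i ++ [0] := by
  intro i
  induction i with
  | zero => rfl
  | succ i ih =>
    rw [pvDescIdx, if_pos (by omega), ih, pvDescIdx, if_pos (by omega)]
    rfl

-- B's backward emission vs A's: they differ at most in the first character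
theorem pvBBL_cases (cs : List Char) (i : Nat) :
    pvBBL cs i = pvABL cs i
      ∨ (pvBS cs (pvBal cs i) i = 0 ∧ pvKeep (cs.getD 0 ' ') = true
          ∧ pvBBL cs i = pvABL cs i ++ [cs.getD 0 ' ']) := by
  by_cases hbs : pvBS cs (pvBal cs i) i = 0
  · by_cases hk : pvKeep (cs.getD 0 ' ') = true
    · right
      refine ⟨hbs, hk, ?_⟩
      unfold pvBBL pvABL
      rw [hbs]
      rw [pvDescIdx_split0 i, List.map_append, List.filter_append]
      congr 1
      simp only [List.map_cons, List.map_nil, List.filter_singleton, hk, cond_true]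
    · left
      unfold pvBBL pvABL
      rw [hbs]
      rw [pvDescIdx_split0 i, List.map_append, List.filter_append]
      have hk' : pvKeep (cs.getD 0 ' ') = false := by
        simpa using hk
      have : (List.filter pvKeep (List.map (fun j => cs.getD j ' ') [0])) = [] := by
        simp only [List.map_cons, List.map_nil, List.filter_singleton, hk', cond_false]
      rw [this, List.append_nil]
      rfl
  · left
    unfold pvBBL pvABL
    rw [show max (pvBS cs (pvBal cs i) i) 1 = pvBS cs (pvBal cs i) i by omega]

-- a span's kept characters, all inside a set
def pvSpanSub (cs : List Char) (b e : Nat) (s : PySem.Set Char) : Prop :=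
  ∀ j, b ≤ j → j < e → pvKeep (cs.getD j ' ') = true → cs.getD j ' ' ∈ s

theorem pvSpanSub_mono (cs : List Char) (b e : Nat) (s : PySem.Set Char) (l : List Char)
    (h : pvSpanSub cs b e s) : pvSpanSub cs b e (PySem.Set.update s l) := by
  intro j h1 h2 h3
  exact (PySem.Set.mem_update _ _ _).mpr (Or.inl (h j h1 h2 h3))

theorem pvSpanSub_step (cs : List Char) (i : Nat) (hi : i < cs.length)
    (hbar : cs.getD i ' ' = '|') (s : PySem.Set Char) :
    pvSpanSub cs (pvBS cs (pvBal cs i) i) (pvFS cs (pvBal cs i) (cs.length - i) i)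
      (PySem.Set.update s (pvBBL cs i ++ pvBFL cs i)) := by
  intro j h1 h2 h3
  rw [PySem.Set.mem_update]
  right
  rw [List.mem_append]
  rcases Nat.lt_or_ge i j with hij | hij
  · right
    unfold pvBFL
    rw [List.mem_filter]
    refine ⟨List.mem_map.mpr ⟨j, ?_, rfl⟩, h3⟩
    rw [List.mem_range'_1]
    omega
  · left
    unfold pvBBL
    rw [List.mem_filter]
    refine ⟨List.mem_map.mpr ⟨j, ?_, rfl⟩, h3⟩
    rw [pvDescIdx_mem]
    omega

-- A's emission for a span already collected adds nothing
theorem pvA_chars_in (cs : List Char) (i : Nat) (hi : i < cs.length)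
    (hbar : cs.getD i ' ' = '|') (s : PySem.Set Char)
    (h : pvSpanSub cs (pvBS cs (pvBal cs i) i) (pvFS cs (pvBal cs i) (cs.length - i) i) s) :
    ∀ c ∈ pvABL cs i ++ pvFL cs i, c ∈ s := by
  intro c hc
  rw [List.mem_append] at hc
  rcases hc with hc | hc
  · unfold pvABL at hc
    rw [List.mem_filter] at hc
    obtain ⟨hmem, hk⟩ := hc
    obtain ⟨j, hj, rfl⟩ := List.mem_map.mp hmem
    rw [pvDescIdx_mem] at hj
    have := pvE_ge cs i hi
    exact h j (by omega) (by omega) hk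
  · unfold pvFL at hc
    rw [List.mem_filter] at hc
    obtain ⟨hmem, hk⟩ := hc
    obtain ⟨j, hj, rfl⟩ := List.mem_map.mp hmem
    rw [List.mem_range'_1] at hj
    have hbs : pvBS cs (pvBal cs i) i ≤ i := Nat.findGreatest_le i
    exact h j (by omega) (by omega) hk

-- dropping a duplicate extra character from an update
theorem pvUpdate_drop (s : PySem.Set Char) (l1 l2 : List Char) (c : Char)
    (h : c ∈ s ∨ c ∈ l1) :
    PySem.Set.update s ((l1 ++ [c]) ++ l2) = PySem.Set.update s (l1 ++ l2) := by
  rw [List.append_assoc, PySem.Set.update_append (ys := [c] ++ l2),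
    PySem.Set.update_append (xs := [c]) (ys := l2)]
  have hadd : (PySem.Set.update s l1).update [c] = PySem.Set.update s l1 := by
    rw [PySem.Set.update_cons, PySem.Set.update_nil]
    apply PySem.Set.add_of_mem
    rw [PySem.Set.mem_update]
    tauto
  rw [hadd, ← PySem.Set.update_append]

-- a covered position lies between the span's stops
theorem pvCov_bounds (cs : List Char) (i j : Nat) (hi : i < cs.length)
    (hbar : cs.getD i ' ' = '|') (hj : j < cs.length) (hcov : pvCov cs i j = true) :
    pvBS cs (pvBal cs i) i ≤ j ∧ j < pvFS cs (pvBal cs i) (cs.length - i) i := by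
  unfold pvCov at hcov
  simp only [List.all_eq_true, decide_eq_true_eq] at hcov
  by_cases hji : j ≤ i
  · constructor
    · by_contra hlt
      push_neg at hlt
      have hb0 : pvBS cs (pvBal cs i) i ≠ 0 := by omega
      have hex : ∃ k, 0 < k ∧ k ≤ i ∧ pvBal cs k < pvBal cs i := by
        by_contra hno
        push_neg at hno
        exact hb0 (Nat.findGreatest_eq_zero_iff.mpr (fun {k} h1 h2 hP => absurd hP (by
          have := hno k h1 h2; omega)))
      obtain ⟨k, hk0, hki, hPk⟩ := hex
      have hPb : pvBal cs (pvBS cs (pvBal cs i) i) < pvBal cs i :=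
        Nat.findGreatest_spec (P := fun k => pvBal cs k < pvBal cs i) hki hPk
      have hble : pvBS cs (pvBal cs i) i ≤ i := Nat.findGreatest_le i
      have := hcov (pvBS cs (pvBal cs i) i) (by rw [List.mem_range]; omega) (by omega)
      omega
    · have := pvE_ge cs i hi
      omega
  · constructor
    · have hbs : pvBS cs (pvBal cs i) i ≤ i := Nat.findGreatest_le i
      omega
    · by_contra hge
      push_neg at hge
      have hEn : pvFS cs (pvBal cs i) (cs.length - i) i < i + (cs.length - i) := by omega
      have hbel := pvFS_below cs (pvBal cs i) (cs.length - i) i hEn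
      have hge' := pvFS_ge cs (pvBal cs i) (cs.length - i) i
      have hEi : i < pvFS cs (pvBal cs i) (cs.length - i) i := pvE_ge cs i hi
      have := hcov (pvFS cs (pvBal cs i) (cs.length - i) i) (by rw [List.mem_range]; omega) (by omega)
      omega

-- a '|' whose backward stop is 0 is a top-level '|'
theorem pvTopBar_of_bs0 (cs : List Char) (i : Nat) (hbar : cs.getD i ' ' = '|')
    (hbs : pvBS cs (pvBal cs i) i = 0) : pvTopBar cs i = true := by
  unfold pvTopBar pvCov
  rw [Bool.and_eq_true, beq_iff_eq, List.all_eq_true]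
  refine ⟨hbar, ?_⟩
  intro k hk
  rw [decide_eq_true_eq]
  intro hmin
  rw [List.mem_range] at hk
  have := Nat.findGreatest_is_greatest (P := fun k => pvBal cs k < pvBal cs i)
    (n := i) (k := k) (by unfold pvBS at hbs; omega) (by omega)
  omega

-- ---------- the master induction over the '|' positions ----------
theorem pvMaster (cs : List Char) (starts stops : PySem.Dict Int Int)
    (hS : ∀ i, i < cs.length → cs.getD i ' ' = '|' →
      starts.getD ((i : Nat) : Int) 0 = ((pvBS cs (pvBal cs i) i : Nat) : Int))
    (hT : ∀ i, i < cs.length → cs.getD i ' ' = '|' →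
      stops.getD ((i : Nat) : Int) 0 = ((pvFS cs (pvBal cs i) (cs.length - i) i : Nat) : Int))
    (hFix : pvKeep (cs.getD 0 ' ') = true → ∀ i, i < cs.length → pvTopBar cs i = true →
      ∃ j, 0 < j ∧ j < cs.length ∧ cs.getD j ' ' = cs.getD 0 ' ' ∧
        (j ≤ i ∨ ∃ i', i' < i ∧ cs.getD i' ' ' = '|' ∧ pvCov cs i' j = true)) :
    ∀ (L : List Nat) (s : PySem.Set Char) (done : PySem.Set (Int × Int)),
      (∀ i ∈ L, i < cs.length ∧ cs.getD i ' ' = '|') →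
      L.Pairwise (· < ·) →
      (∀ sp ∈ done, ∃ b e : Nat, sp = ((b : Int), (e : Int)) ∧ pvSpanSub cs b e s) →
      (∀ i', i' < cs.length → cs.getD i' ' ' = '|' → i' ∉ L →
        pvSpanSub cs (pvBS cs (pvBal cs i') i') (pvFS cs (pvBal cs i') (cs.length - i') i') s) →
      ((L.map (fun k : Nat => (k : Int))).foldl (pvStep3 cs starts stops) (s, done)).1
        = L.foldl (fun s i => PySem.Set.update s (pvABL cs i ++ pvFL cs i)) s := by
  intro L
  induction L with
  | nil => intro s done _ _ _ _; rfl
  | cons i L' ih =>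
    intro s done hL hPair hDone hProc
    obtain ⟨hi, hbar⟩ := hL i (List.mem_cons_self)
    rw [List.map_cons, List.foldl_cons, List.foldl_cons]
    have hstep3 : pvStep3 cs starts stops (s, done) ((i : Nat) : Int)
        = if PySem.Set.contains done
            (((pvBS cs (pvBal cs i) i : Nat) : Int), ((pvFS cs (pvBal cs i) (cs.length - i) i : Nat) : Int))
          then (s, done)
          else (PySem.Set.update s (pvBBL cs i ++ pvBFL cs i),
            PySem.Set.add done
              (((pvBS cs (pvBal cs i) i : Nat) : Int), ((pvFS cs (pvBal cs i) (cs.length - i) i : Nat) : Int))) := by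
      simp only [pvStep3, hS i hi hbar, hT i hi hbar]
      by_cases hmem : PySem.Set.contains done
          (((pvBS cs (pvBal cs i) i : Nat) : Int), ((pvFS cs (pvBal cs i) (cs.length - i) i : Nat) : Int)) = true
      · rw [if_pos hmem, if_pos hmem]
      · rw [if_neg hmem, if_neg hmem]
        have hback : (PySem.List.pyRange ((i : Nat) : Int) (((pvBS cs (pvBal cs i) i : Nat) : Int) - 1) (-1)).foldl
            (fun o j => if pvKeep (PySem.List.pyGetD cs j ' ')
              then PySem.Set.add o (PySem.List.pyGetD cs j ' ') else o) s
            = PySem.Set.update s (pvBBL cs i) := by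
          rw [pvPyRangeDesc i (pvBS cs (pvBal cs i) i), List.foldl_map]
          have hcongr : (fun (o : PySem.Set Char) (k : Nat) =>
              if pvKeep (PySem.List.pyGetD cs ((k : Nat) : Int) ' ')
                then PySem.Set.add o (PySem.List.pyGetD cs ((k : Nat) : Int) ' ') else o)
              = (fun (o : PySem.Set Char) (k : Nat) =>
                if pvKeep (cs.getD k ' ') then PySem.Set.add o (cs.getD k ' ') else o) := by
            funext o k
            rw [PySem.List.pyGetD_natCast]
          rw [hcongr, pvFoldAddIf]
          rfl
        have hfwd : ∀ s' : PySem.Set Char,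
            (PySem.List.pyRange (((i : Nat) : Int) + 1) ((pvFS cs (pvBal cs i) (cs.length - i) i : Nat) : Int) 1).foldl
            (fun o j => if pvKeep (PySem.List.pyGetD cs j ' ')
              then PySem.Set.add o (PySem.List.pyGetD cs j ' ') else o) s'
            = PySem.Set.update s' (pvBFL cs i) := by
          intro s'
          rw [show ((i : Nat) : Int) + 1 = ((i + 1 : Nat) : Int) by push_cast; ring]
          rw [pvPyRangeAsc (i + 1) (pvFS cs (pvBal cs i) (cs.length - i) i), List.foldl_map]
          have hcongr : (fun (o : PySem.Set Char) (k : Nat) =>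
              if pvKeep (PySem.List.pyGetD cs ((k : Nat) : Int) ' ')
                then PySem.Set.add o (PySem.List.pyGetD cs ((k : Nat) : Int) ' ') else o)
              = (fun (o : PySem.Set Char) (k : Nat) =>
                if pvKeep (cs.getD k ' ') then PySem.Set.add o (cs.getD k ' ') else o) := by
            funext o k
            rw [PySem.List.pyGetD_natCast]
          rw [hcongr, pvFoldAddIf]
          rfl
        rw [hback, hfwd, ← PySem.Set.update_append]
    rw [hstep3]
    by_cases hmem : PySem.Set.contains done
        (((pvBS cs (pvBal cs i) i : Nat) : Int), ((pvFS cs (pvBal cs i) (cs.length - i) i : Nat) : Int)) = true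
    · -- the span was collected before: A's update adds nothing
      rw [if_pos hmem]
      obtain ⟨b, e, hbe, hsub⟩ := hDone _ ((PySem.Set.contains_iff _ _).mp hmem)
      have hb : b = pvBS cs (pvBal cs i) i := by
        have := congrArg Prod.fst hbe
        simp only at this
        exact_mod_cast this.symm
      have he : e = pvFS cs (pvBal cs i) (cs.length - i) i := by
        have := congrArg Prod.snd hbe
        simp only at this
        exact_mod_cast this.symm
      subst hb; subst he
      have hnoop : PySem.Set.update s (pvABL cs i ++ pvFL cs i) = s :=
        pvUpdate_eq_self s _ (pvA_chars_in cs i hi hbar s hsub)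
      rw [hnoop]
      apply ih s done
      · intro x hx; exact hL x (List.mem_cons_of_mem _ hx)
      · exact hPair.of_cons
      · exact hDone
      · intro i' h1 h2 h3
        by_cases hii : i' = i
        · subst hii; exact hsub
        · exact hProc i' h1 h2 (by simp [hii, h3])
    · -- a new span: both sides add the same characters
      rw [if_neg hmem]
      have heq : PySem.Set.update s (pvBBL cs i ++ pvBFL cs i)
          = PySem.Set.update s (pvABL cs i ++ pvFL cs i) := by
        rw [pvFL_eq_pvBFL cs i hi hbar]
        rcases pvBBL_cases cs i with hc | ⟨hbs, hk, hc⟩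
        · rw [hc]
        · rw [hc]
          apply pvUpdate_drop
          have hnone := pvTopBar_of_bs0 cs i hbar hbs
          obtain ⟨j, hj0, hjn, hjc, hcase⟩ := hFix hk i hi hnone
          rcases hcase with hji | ⟨i', hi'i, hbar', hcov⟩
          · right
            unfold pvABL
            rw [hbs]
            rw [List.mem_filter]
            constructor
            · apply List.mem_map.mpr
              refine ⟨j, ?_, hjc⟩
              rw [pvDescIdx_mem]
              constructor
              · omega
              · omega
            · exact hk
          · left
            have hi'n : i' < cs.length := by omega
            have hi'notin : i' ∉ i :: L' := by
              have hlt := (List.pairwise_cons.mp hPair).1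
              intro hmem'
              rcases List.mem_cons.mp hmem' with rfl | hmem''
              · omega
              · exact absurd (hlt i' hmem'') (by omega)
            have hsub := hProc i' hi'n hbar' hi'notin
            have hbounds := pvCov_bounds cs i' j hi'n hbar' hjn hcov
            have := hsub j hbounds.1 hbounds.2 (by rw [hjc]; exact hk)
            rw [hjc] at this
            exact this
      rw [heq]
      apply ih
      · intro x hx; exact hL x (List.mem_cons_of_mem _ hx)
      · exact hPair.of_cons
      · intro sp hsp
        rcases (PySem.Set.mem_add _ _ _).mp hsp with hold | hnew
        · obtain ⟨b, e, hbe, hsub⟩ := hDone sp hold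
          exact ⟨b, e, hbe, pvSpanSub_mono cs b e s _ hsub⟩
        · refine ⟨pvBS cs (pvBal cs i) i, pvFS cs (pvBal cs i) (cs.length - i) i, hnew, ?_⟩
          rw [← heq]
          exact pvSpanSub_step cs i hi hbar s
      · intro i' h1 h2 h3
        by_cases hii : i' = i
        · subst hii
          rw [← heq]
          exact pvSpanSub_step cs i' h1 h2 s
        · refine pvSpanSub_mono cs _ _ s _ (hProc i' h1 h2 ?_)
          intro hm
          rcases List.mem_cons.mp hm with rfl | hm'
          · exact hii rfl
          · exact h3 hm'

-- ---------- assembling the two ports ----------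
theorem pvSets_eq (dep : String) (hD : ¬ D_extract_or_deps dep) :
    (List.range dep.toList.length).foldl
      (fun s ind => if dep.toList.getD ind ' ' = '|'
        then pvScanF dep.toList 0 ind (pvScanB dep.toList 0 ind s) else s)
      PySem.Set.empty
    = (((List.range (dep.toList.length + 1)).foldl (pvStep1 dep.toList (pvBalArr dep.toList))
          (PySem.Dict.empty, PySem.Dict.empty)).2.keys.foldl
        (pvStep3 dep.toList
          ((List.range (dep.toList.length + 1)).foldl (pvStep1 dep.toList (pvBalArr dep.toList))
            (PySem.Dict.empty, PySem.Dict.empty)).2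
          ((PySem.List.pyRange ((dep.toList.length : Nat) : Int) (-1) (-1)).foldl
            (pvStep2 dep.toList (pvBalArr dep.toList))
            (PySem.Dict.empty, PySem.Dict.empty)).2)
        (PySem.Set.empty, PySem.Set.empty)).1 := by
  have hA : (List.range dep.toList.length).foldl
      (fun s ind => if dep.toList.getD ind ' ' = '|'
        then pvScanF dep.toList 0 ind (pvScanB dep.toList 0 ind s) else s)
      PySem.Set.empty
      = ((List.range dep.toList.length).filter
          (fun k => decide (k < dep.toList.length) && decide (dep.toList.getD k ' ' = '|'))).foldl
          (fun s i => PySem.Set.update s (pvABL dep.toList i ++ pvFL dep.toList i))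
          PySem.Set.empty := by
    rw [List.foldl_filter]
    apply PySem.List.foldl_congr_mem
    intro acc x hx
    rw [List.mem_range] at hx
    by_cases hb : dep.toList.getD x ' ' = '|'
    · rw [if_pos hb, if_pos (by
        rw [Bool.and_eq_true, decide_eq_true_eq, decide_eq_true_eq]
        exact ⟨hx, hb⟩), pvStepA_update dep.toList x hx hb]
    · rw [if_neg hb, if_neg (by
        rw [Bool.and_eq_true]
        intro h
        exact hb (decide_eq_true_eq.mp h.2))]
  rw [hA]
  have hkeys : ((List.range (dep.toList.length + 1)).foldl (pvStep1 dep.toList (pvBalArr dep.toList))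
      (PySem.Dict.empty, PySem.Dict.empty)).2.keys
      = (((List.range (dep.toList.length + 1)).filter
          (fun k => decide (k < dep.toList.length) && decide (dep.toList.getD k ' ' = '|'))).map
          (fun k : Nat => (k : Int))) := pvP1_keys dep.toList dep.toList.length (le_refl _)
  have hfilter : (List.range (dep.toList.length + 1)).filter
      (fun k => decide (k < dep.toList.length) && decide (dep.toList.getD k ' ' = '|'))
      = (List.range dep.toList.length).filter
        (fun k => decide (k < dep.toList.length) && decide (dep.toList.getD k ' ' = '|')) := by
    rw [List.range_succ, List.filter_append, List.filter_singleton,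
      show (decide (dep.toList.length < dep.toList.length)
        && decide (dep.toList.getD dep.toList.length ' ' = '|')) = false by simp]
    rw [cond_false, List.append_nil]
  rw [hkeys, hfilter]
  symm
  apply pvMaster dep.toList
  · -- hS
    intro i hi hb
    rw [show (List.range (dep.toList.length + 1)).foldl (pvStep1 dep.toList (pvBalArr dep.toList))
        (PySem.Dict.empty, PySem.Dict.empty) = pvP1 dep.toList (dep.toList.length + 1) from rfl]
    rw [PySem.Dict.getD_eq_get?_getD,
      (pvP1_starts dep.toList dep.toList.length (le_refl _)).1 i (by omega), if_pos ⟨hi, hb⟩]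
    rfl
  · -- hT
    intro i hi hb
    rw [show (PySem.List.pyRange ((dep.toList.length : Nat) : Int) (-1) (-1)).foldl
        (pvStep2 dep.toList (pvBalArr dep.toList)) (PySem.Dict.empty, PySem.Dict.empty)
        = pvP2Go dep.toList dep.toList.length (PySem.Dict.empty, PySem.Dict.empty) from rfl]
    rw [PySem.Dict.getD_eq_get?_getD, pvStops dep.toList i hi hb]
    rfl
  · -- hFix from ¬D_
    intro hk i hi hnone
    by_contra hno
    push_neg at hno
    apply hD
    have hbar2 : dep.toList.getD i ' ' = '|' := by
      have h2 := hnone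
      unfold pvTopBar at h2
      rw [Bool.and_eq_true, beq_iff_eq] at h2
      exact h2.1
    have hmem : '|' ∈ dep.toList := by
      rw [← hbar2, List.getD_eq_getElem dep.toList ' ' hi]
      exact List.getElem_mem hi
    refine ⟨(pvKeep_iff _).mp hk, hmem, i, List.mem_range.mpr hi, hnone, ?_⟩
    intro j hj hj0 hjc hcontra
    have hno' := hno j hj0 (List.mem_range.mp hj) hjc
    rcases hcontra with hle | ⟨i', hi'mem, hbar', hcov⟩
    · have := hno'.1
      omega
    · exact (hno'.2 i' (List.mem_range.mp hi'mem) hbar') hcov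
  · -- membership
    intro x hx
    rw [List.mem_filter, List.mem_range] at hx
    obtain ⟨h1, h2⟩ := hx
    simp only [Bool.and_eq_true, decide_eq_true_eq] at h2
    exact ⟨h1, h2.2⟩
  · -- pairwise
    exact (List.pairwise_lt_range).sublist List.filter_sublist
  · -- done empty
    intro sp hsp
    exact absurd hsp (List.not_mem_nil)
  · -- all bars still to process
    intro i' h1 h2 h3
    exact absurd (List.mem_filter.mpr ⟨List.mem_range.mpr h1, by
      rw [Bool.and_eq_true, decide_eq_true_eq, decide_eq_true_eq]
      exact ⟨h1, h2⟩⟩) h3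

-- ===== VERDICT (by name: the statement is the Claim_ definition above) =====
theorem extract_or_deps_spec : Claim_unchanged_extract_or_deps := by
  intro dep _ hD
  show extract_or_deps dep = extract_or_deps_alt dep
  simp only [extract_or_deps, extract_or_deps_alt]
  rw [pvSets_eq dep hD]

theorem extract_or_deps_changed : Claim_changed_extract_or_deps := by
  unfold Claim_changed_extract_or_deps; decide
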